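-- pv_equiv track=rewrite | github.com/angus4718/lob-deep-survival-analysis | src/order_tracking.py | _select_split_points_by_message_count
-- ===== SOURCE A (Python) =====
-- def _select_split_points(empty_points: list[int], n: int) -> list[int]:
--     """
--     Choose ``n - 1`` timestamps from *empty_points* that divide the
--     timeline ``[empty_points[0], empty_points[-1]]`` into *n* roughly
--     equal segments.
--
--     Args:
--         empty_points: Sorted list of empty-market timestamps (ns).
--         n: Desired number of chunks.
--
--     Returns:
--         Sorted list of ``n - 1`` split timestamps (may be fewer if there
--         are not enough distinct empty points).
--     """
--     if n <= 1 or not empty_points: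
--         return []
--     lo, hi = empty_points[0], empty_points[-1]
--     if lo == hi:
--         return []
--     targets = [lo + i * (hi - lo) // n for i in range(1, n)]
--     chosen: set = set()
--     for target in targets:
--         best = min(empty_points, key=lambda t: abs(t - target))
--         chosen.add(best)
--     return sorted(chosen)
--
-- def _select_split_points_by_message_count(
--     empty_points: list[int],
--     messages_between_splits: list[int],
--     n: int,
-- ) -> list[int]:
--     """
--     Choose ``n - 1`` timestamps from *empty_points* that divide the
--     data into *n* chunks with roughly equal message counts, while ensuring
--     each chunk starts at an empty-market point.
--
--     Args:
--         empty_points: Sorted list of empty-market timestamps (ns).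
--         messages_between_splits: Message counts for each segment between
--             consecutive empty points. Must have length len(empty_points) + 1.
--             Segment i contains messages between empty_points[i-1] and
--             empty_points[i] (or file boundaries).
--         n: Desired number of chunks.
--
--     Returns:
--         Sorted list of ``n - 1`` split timestamps that start empty-market
--         transitions and balance message counts across chunks.
--     """
--     if n <= 1 or not empty_points:
--         return []
--     if len(messages_between_splits) != len(empty_points) + 1:
--         # Fallback to time-based split if message counts don't match
--         return _select_split_points(empty_points, n)
--
--     # Build cumulative message counts at each empty point
--     # cumulative[i] = total messages from file start up to (but not including) empty_points[i]
--     cumulative = [0]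
--     for i in range(len(empty_points)):
--         cumulative.append(cumulative[-1] + messages_between_splits[i])
--     total_messages = cumulative[-1] + messages_between_splits[-1]
--
--     # Target cumulative message count for each chunk boundary
--     target_cumulative = [i * total_messages // n for i in range(1, n)]
--
--     # For each target, find the closest empty point
--     chosen: set = set()
--     for target in target_cumulative:
--         # Find the empty point with cumulative closest to target
--         best_idx = min(
--             range(len(empty_points)),
--             key=lambda i: abs(cumulative[i + 1] - target),
--         )
--         chosen.add(empty_points[best_idx])
--
--     return sorted(chosen)
-- ===== SOURCE B (Python) =====
-- def _bisect_left(pairs, t):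
--     # first index whose pair's value is >= t
--     lo, hi = 0, len(pairs)
--     while lo < hi:
--         mid = (lo + hi) // 2
--         if pairs[mid][0] < t:
--             lo = mid + 1
--         else:
--             hi = mid
--     return lo
--
--
-- def _closest_pair(pairs, t):
--     # pairs: (value, first_position), strictly increasing by value, nonempty.
--     # Returns the pair minimizing |value - t|, ties broken by smaller position
--     # (= Python min()'s first-minimum over the original order).
--     j = _bisect_left(pairs, t)
--     if j == 0:
--         return pairs[0]
--     if j == len(pairs):
--         return pairs[-1]
--     p1, p2 = pairs[j - 1], pairs[j]
--     d1, d2 = t - p1[0], p2[0] - t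
--     if d1 < d2:
--         return p1
--     if d2 < d1:
--         return p2
--     return p1 if p1[1] < p2[1] else p2
--
--
-- def _first_occurrence_pairs(xs):
--     # Distinct values of xs with the position of their first occurrence,
--     # sorted by value.
--     seen = set()
--     pairs = []
--     for i, x in enumerate(xs):
--         if x not in seen:
--             seen.add(x)
--             pairs.append((x, i))
--     pairs.sort(key=lambda p: p[0])
--     return pairs
--
--
-- def _fallback_time_split(empty_points, n):
--     lo, hi = empty_points[0], empty_points[-1]
--     if lo == hi:
--         return []
--     pairs = _first_occurrence_pairs(empty_points)
--     chosen = set()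
--     for i in range(1, n):
--         target = lo + i * (hi - lo) // n
--         chosen.add(_closest_pair(pairs, target)[0])
--     return sorted(chosen)
--
--
-- def _select_split_points_by_message_count(empty_points, messages_between_splits, n):
--     if n <= 1 or not empty_points:
--         return []
--     m = len(empty_points)
--     if len(messages_between_splits) != m + 1:
--         return _fallback_time_split(empty_points, n)
--     cums = []
--     s = 0
--     for i in range(m):
--         s += messages_between_splits[i]
--         cums.append(s)
--     total = s + messages_between_splits[m]
--     pairs = _first_occurrence_pairs(cums)
--     chosen = set()
--     for k in range(1, n):
--         target = k * total // n
--         chosen.add(empty_points[_closest_pair(pairs, target)[1]])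
--     return sorted(chosen)
-- ===== Notes on version B (the rewrite author's own statement) =====
-- stated objective: faster
-- what changed: B replaces A's full min()-scan of all empty points per target by a sort-once / binary-search-per-target scheme: it dedups the cumulative counts into (value, first-position) pairs, sorts them by value, and for each target hand-rolled bisect_left finds the two neighbouring values, choosing between them by distance with first-position tie-break (the fallback time-based split uses the same machinery on the points themselves).
import Mathlib
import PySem

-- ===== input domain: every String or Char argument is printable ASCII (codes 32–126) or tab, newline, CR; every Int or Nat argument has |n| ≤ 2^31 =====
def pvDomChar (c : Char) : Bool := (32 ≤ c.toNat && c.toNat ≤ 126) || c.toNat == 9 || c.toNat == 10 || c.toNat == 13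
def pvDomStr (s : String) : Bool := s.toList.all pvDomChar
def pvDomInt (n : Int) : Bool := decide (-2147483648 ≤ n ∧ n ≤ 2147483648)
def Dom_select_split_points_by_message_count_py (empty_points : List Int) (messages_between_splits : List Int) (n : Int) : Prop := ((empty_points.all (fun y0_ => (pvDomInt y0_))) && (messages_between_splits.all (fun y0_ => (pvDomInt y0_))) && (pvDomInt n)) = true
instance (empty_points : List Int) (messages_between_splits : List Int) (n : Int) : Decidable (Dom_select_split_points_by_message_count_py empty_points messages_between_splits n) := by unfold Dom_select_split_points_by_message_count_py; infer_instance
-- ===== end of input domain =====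

-- B replaces A's full min()-scan per target by dedup-to-(value, first-index) pairs sorted
-- once, then a hand-rolled binary search per target with neighbour/first-index tie-break
-- (objective: faster, O((m+n) log m) instead of O(n*m)).

-- ===== PORT A =====
-- port of the module helper _select_split_points (time-based fallback)
def pvSplitTime (empty_points : List Int) (n : Int) : List Int :=
  if n ≤ 1 ∨ empty_points = [] then []
  else
    let lo := PySem.List.pyGetD empty_points 0 0
    let hi := PySem.List.pyGetD empty_points (-1) 0
    if lo = hi then []
    else
      let targets := (PySem.List.pyRange 1 n 1).map (fun i => lo + PySem.Int.floordiv (i * (hi - lo)) n)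
      let chosen := targets.foldl (fun s target =>
        PySem.Set.add s ((PySem.List.min? empty_points (fun t => |t - target|)).getD 0)) PySem.Set.empty
      PySem.List.sorted chosen (fun x => x) false

def select_split_points_by_message_count_py (empty_points : List Int) (messages_between_splits : List Int) (n : Int) : List Int :=
  if n ≤ 1 ∨ empty_points = [] then []
  else if PySem.List.len messages_between_splits ≠ PySem.List.len empty_points + 1 then
    pvSplitTime empty_points n
  else
    let cumulative := (PySem.List.pyRange 0 (PySem.List.len empty_points) 1).foldl
      (fun c i => c ++ [PySem.List.pyGetD c (-1) 0 + PySem.List.pyGetD messages_between_splits i 0]) [0]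
    let total := PySem.List.pyGetD cumulative (-1) 0 + PySem.List.pyGetD messages_between_splits (-1) 0
    let targets := (PySem.List.pyRange 1 n 1).map (fun i => PySem.Int.floordiv (i * total) n)
    let chosen := targets.foldl (fun s target =>
      PySem.Set.add s (PySem.List.pyGetD empty_points
        ((PySem.List.min? (PySem.List.pyRange 0 (PySem.List.len empty_points) 1)
          (fun i => |PySem.List.pyGetD cumulative (i + 1) 0 - target|)).getD 0) 0)) PySem.Set.empty
    PySem.List.sorted chosen (fun x => x) false

-- ===== PORT B =====
-- hand-rolled bisect_left of Source B: first index whose pair's value is >= t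
def pvBisect (pairs : List (Int × Int)) (t : Int) (lo hi : Nat) : Nat :=
  if _h : lo < hi then
    if (pairs.getD ((lo + hi) / 2) (0, 0)).1 < t then pvBisect pairs t ((lo + hi) / 2 + 1) hi
    else pvBisect pairs t lo ((lo + hi) / 2)
  else lo
termination_by hi - lo
decreasing_by all_goals omega

-- _closest_pair of Source B
def pvClosest (pairs : List (Int × Int)) (t : Int) : Int × Int :=
  let j := pvBisect pairs t 0 pairs.length
  if j = 0 then pairs.getD 0 (0, 0)
  else if j = pairs.length then PySem.List.pyGetD pairs (-1) (0, 0)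
  else
    let p1 := pairs.getD (j - 1) (0, 0)
    let p2 := pairs.getD j (0, 0)
    let d1 := t - p1.1
    let d2 := p2.1 - t
    if d1 < d2 then p1
    else if d2 < d1 then p2
    else if p1.2 < p2.2 then p1 else p2

-- _first_occurrence_pairs of Source B
def pvFirstPairs (xs : List Int) : List (Int × Int) :=
  let fin := (PySem.List.enumerate xs).foldl
    (fun st ix => if PySem.Set.contains st.1 ix.2 then st
                  else (PySem.Set.add st.1 ix.2, st.2 ++ [(ix.2, ix.1)]))
    ((PySem.Set.empty : PySem.Set Int), ([] : List (Int × Int)))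
  PySem.List.sorted fin.2 (fun p => p.1) false

-- _fallback_time_split of Source B
def pvFallbackTime (empty_points : List Int) (n : Int) : List Int :=
  let lo := PySem.List.pyGetD empty_points 0 0
  let hi := PySem.List.pyGetD empty_points (-1) 0
  if lo = hi then []
  else
    let pairs := pvFirstPairs empty_points
    let chosen := (PySem.List.pyRange 1 n 1).foldl
      (fun s i => PySem.Set.add s (pvClosest pairs (lo + PySem.Int.floordiv (i * (hi - lo)) n)).1)
      PySem.Set.empty
    PySem.List.sorted chosen (fun x => x) false

def select_split_points_by_message_count_py_alt (empty_points : List Int) (messages_between_splits : List Int) (n : Int) : List Int :=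
  if n ≤ 1 ∨ empty_points = [] then []
  else
    let m := empty_points.length
    if (messages_between_splits.length : Int) ≠ (m : Int) + 1 then pvFallbackTime empty_points n
    else
      let fin := (PySem.List.pyRange 0 (m : Int) 1).foldl
        (fun st i =>
          let s := st.1 + PySem.List.pyGetD messages_between_splits i 0
          (s, st.2 ++ [s]))
        ((0 : Int), ([] : List Int))
      let total := fin.1 + PySem.List.pyGetD messages_between_splits (m : Int) 0
      let pairs := pvFirstPairs fin.2
      let chosen := (PySem.List.pyRange 1 n 1).foldl
        (fun s k => PySem.Set.add s (PySem.List.pyGetD empty_points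
          (pvClosest pairs (PySem.Int.floordiv (k * total) n)).2 0))
        PySem.Set.empty
      PySem.List.sorted chosen (fun x => x) false

-- ===== PRECONDITION & SPEC =====
def Spec_select_split_points_by_message_count_py (empty_points : List Int) (messages_between_splits : List Int) (n : Int) (out : List Int) : Prop := out = select_split_points_by_message_count_py_alt empty_points messages_between_splits n
instance (empty_points : List Int) (messages_between_splits : List Int) (n : Int) (out : List Int) : Decidable (Spec_select_split_points_by_message_count_py empty_points messages_between_splits n out) := by unfold Spec_select_split_points_by_message_count_py; infer_instance

-- ===== CLAIM (what is proved, stated in full; the proofs are below) =====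
def Claim_equal_select_split_points_by_message_count_py : Prop := ∀ (empty_points : List Int) (messages_between_splits : List Int) (n : Int), Dom_select_split_points_by_message_count_py empty_points messages_between_splits n → Spec_select_split_points_by_message_count_py empty_points messages_between_splits n (select_split_points_by_message_count_py empty_points messages_between_splits n)

-- ===== LEMMAS AND PROOFS =====

-- first index attaining the minimum of `key` on range m: existence and characterisation
theorem pvMinRangeSpec (key : Nat → Int) (m : Nat) (hm : 0 < m) :
    ∃ k, PySem.List.min? (List.range m) key = some k ∧ k < m ∧
      (∀ i, i < m → key k ≤ key i) ∧ (∀ i, i < k → key k < key i) := by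
  induction m with
  | zero => omega
  | succ m ih =>
    by_cases hm0 : 0 < m
    · obtain ⟨k, hk, hkm, hmin, hfst⟩ := ih hm0
      have hstep : PySem.List.min? (List.range (m + 1)) key
          = if key m < key k then some m else some k := by
        unfold PySem.List.min? at hk ⊢
        rw [List.range_succ, List.foldl_append, hk]
        rfl
      by_cases hlt : key m < key k
      · refine ⟨m, by rw [hstep, if_pos hlt], by omega, ?_, ?_⟩
        · intro i hi
          rcases Nat.lt_succ_iff_lt_or_eq.mp hi with h | h
          · exact le_of_lt (lt_of_lt_of_le hlt (hmin i h))
          · subst h; exact le_refl _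
        · intro i hi
          exact lt_of_lt_of_le hlt (hmin i hi)
      · refine ⟨k, by rw [hstep, if_neg hlt], by omega, ?_, hfst⟩
        intro i hi
        rcases Nat.lt_succ_iff_lt_or_eq.mp hi with h | h
        · exact hmin i h
        · subst h; exact not_lt.mp hlt
    · have hm1 : m = 0 := by omega
      subst hm1
      refine ⟨0, rfl, by omega, ?_, by omega⟩
      intro i hi
      interval_cases i
      exact le_refl _

theorem pvSpecUnique (key : Nat → Int) (m k1 k2 : Nat)
    (h1 : k1 < m ∧ (∀ i, i < m → key k1 ≤ key i) ∧ (∀ i, i < k1 → key k1 < key i))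
    (h2 : k2 < m ∧ (∀ i, i < m → key k2 ≤ key i) ∧ (∀ i, i < k2 → key k2 < key i)) :
    k1 = k2 := by
  rcases h1 with ⟨hm1, hmin1, hfst1⟩
  rcases h2 with ⟨hm2, hmin2, hfst2⟩
  rcases lt_trichotomy k1 k2 with h | h | h
  · exact absurd (hmin1 k2 hm2) (not_le.mpr (hfst2 k1 h))
  · exact h
  · exact absurd (hmin2 k1 hm1) (not_le.mpr (hfst1 k2 h))

-- B's running-sum loop builds the prefix-sum list
theorem pvCumB (msgs : List Int) :
    ∀ m : Nat, m ≤ msgs.length →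
    (PySem.List.pyRange 0 (m : Int) 1).foldl
      (fun st i =>
        let s := st.1 + PySem.List.pyGetD msgs i 0
        (s, st.2 ++ [s]))
      ((0 : Int), ([] : List Int))
    = ((msgs.take m).sum, (List.range m).map (fun k => (msgs.take (k + 1)).sum)) := by
  intro m
  induction m with
  | zero => intro _; simp [PySem.List.pyRange_one_eq_nil]
  | succ m ih =>
    intro hm
    have h1 : ((m + 1 : Nat) : Int) = (m : Int) + 1 := by push_cast; ring
    rw [h1, PySem.List.pyRange_one_succ_right (by positivity), List.foldl_append, ih (by omega)]
    simp only [List.foldl_cons, List.foldl_nil]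
    have hlt : m < msgs.length := by omega
    rw [show PySem.List.pyGetD msgs (m : Int) 0 = msgs.getD m 0 from PySem.List.pyGetD_natCast msgs m 0]
    have htake : (msgs.take (m + 1)).sum = (msgs.take m).sum + msgs.getD m 0 := by
      rw [List.take_add_one, List.sum_append]
      simp [List.getD, List.getElem?_eq_getElem hlt]
    rw [show List.range (m + 1) = List.range m ++ [m] from List.range_succ, List.map_append]
    simp only [List.map_cons, List.map_nil, Prod.mk.injEq]
    exact ⟨htake.symm, by rw [htake]⟩

-- A's append loop builds the prefix-sum list (with leading 0)
theorem pvCum (msgs : List Int) :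
    ∀ (m : Nat), m ≤ msgs.length →
    (PySem.List.pyRange 0 (m : Int) 1).foldl
      (fun c i => c ++ [PySem.List.pyGetD c (-1) 0 + PySem.List.pyGetD msgs i 0]) [0]
    = (List.range (m + 1)).map (fun k => (msgs.take k).sum) := by
  intro m
  induction m with
  | zero => intro _; simp [PySem.List.pyRange_one_eq_nil]
  | succ m ih =>
    intro hm
    have h1 : ((m + 1 : Nat) : Int) = (m : Int) + 1 := by push_cast; ring
    rw [h1, PySem.List.pyRange_one_succ_right (by positivity), List.foldl_append,
        ih (by omega)]
    simp only [List.foldl_cons, List.foldl_nil]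
    have hprev : (List.range (m + 1)).map (fun k => (msgs.take k).sum)
        = (List.range m).map (fun k => (msgs.take k).sum) ++ [(msgs.take m).sum] := by
      rw [List.range_succ, List.map_append]; rfl
    have hlast : PySem.List.pyGetD ((List.range (m + 1)).map (fun k => (msgs.take k).sum)) (-1) 0
        = (msgs.take m).sum := by
      rw [hprev, PySem.List.pyGetD_neg_one_append_singleton]
    rw [hlast]
    rw [show List.range (m + 1 + 1) = List.range (m + 1) ++ [m + 1] from List.range_succ]
    rw [List.map_append]
    congr 1
    simp only [List.map_cons, List.map_nil]
    have hlt : m < msgs.length := by omega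
    rw [show PySem.List.pyGetD msgs (m : Int) 0 = msgs.getD m 0 by simp]
    rw [List.take_add_one, List.sum_append]
    simp [List.getD, List.getElem?_eq_getElem hlt]

-- the dedup loop of _first_occurrence_pairs, before sorting
theorem pvPairsFold (cs : List Int) :
    (PySem.List.enumerate cs).foldl
      (fun st ix => if PySem.Set.contains st.1 ix.2 then st
                    else (PySem.Set.add st.1 ix.2, st.2 ++ [(ix.2, ix.1)]))
      ((PySem.Set.empty : PySem.Set Int), ([] : List (Int × Int)))
    = (PySem.Set.ofList cs,
       (PySem.Set.ofList cs).map (fun v => (v, (((PySem.List.index? cs v).getD 0 : Nat) : Int)))) := by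
  induction cs using List.reverseRecOn with
  | nil => rfl
  | append_singleton xs x ih =>
    rw [PySem.List.enumerate_append, List.foldl_append, ih,
        PySem.List.enumerate_cons, PySem.List.enumerate_nil]
    simp only [List.foldl_cons, List.foldl_nil]
    have hofl : PySem.Set.ofList (xs ++ [x]) = PySem.Set.add (PySem.Set.ofList xs) x := by
      rw [PySem.Set.ofList_eq_foldl, PySem.Set.ofList_eq_foldl, List.foldl_append]
      rfl
    by_cases hx : x ∈ xs
    · have hc : PySem.Set.contains (PySem.Set.ofList xs) x = true :=
        (PySem.Set.contains_iff _ _).mpr ((PySem.Set.mem_ofList xs x).mpr hx)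
      rw [if_pos hc, hofl]
      unfold PySem.Set.add
      rw [if_pos hc]
      congr 1
      apply List.map_congr_left
      intro v hv
      rw [PySem.List.index?_append_of_mem [x] ((PySem.Set.mem_ofList xs v).mp hv)]
    · have hc : ¬ PySem.Set.contains (PySem.Set.ofList xs) x = true := by
        rw [PySem.Set.contains_iff, PySem.Set.mem_ofList]
        exact hx
      rw [if_neg hc, hofl]
      unfold PySem.Set.add
      rw [if_neg hc]
      simp only [Prod.mk.injEq]
      refine ⟨by trivial, ?_⟩
      rw [List.map_append]
      congr 1
      · apply List.map_congr_left
        intro v hv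
        rw [PySem.List.index?_append_of_mem [x] ((PySem.Set.mem_ofList xs v).mp hv)]
      · simp only [List.map_cons, List.map_nil]
        rw [PySem.List.index?_append_singleton_self xs x hx]
        simp

-- facts about the sorted pair list
theorem pvQSpec (cs : List Int) :
    List.Pairwise (fun p q => p.1 < q.1) (pvFirstPairs cs) ∧
    (∀ p ∈ pvFirstPairs cs, ∃ k : Nat, p.2 = (k : Int) ∧ PySem.List.index? cs p.1 = some k) ∧
    (∀ v ∈ cs, ∃ p ∈ pvFirstPairs cs, p.1 = v) ∧
    (cs ≠ [] → pvFirstPairs cs ≠ []) := by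
  have hP : pvFirstPairs cs = PySem.List.sorted
      ((PySem.Set.ofList cs).map (fun v => (v, (((PySem.List.index? cs v).getD 0 : Nat) : Int))))
      (fun p => p.1) false := by
    unfold pvFirstPairs
    rw [pvPairsFold]
  set f : Int → Int × Int := fun v => (v, (((PySem.List.index? cs v).getD 0 : Nat) : Int)) with hf
  have hmemP : ∀ p, p ∈ pvFirstPairs cs ↔ p ∈ (PySem.Set.ofList cs).map f := by
    intro p; rw [hP, PySem.List.mem_sorted]
  refine ⟨?_, ?_, ?_, ?_⟩
  · -- strictly increasing first components
    have hle : List.Pairwise (fun p q : Int × Int => p.1 ≤ q.1) (pvFirstPairs cs) := by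
      rw [hP]; exact PySem.List.sorted_pairwise _ _
    have hnodup : ((pvFirstPairs cs).map (fun p => p.1)).Nodup := by
      have hperm : (pvFirstPairs cs).Perm ((PySem.Set.ofList cs).map f) := by
        rw [hP]; exact PySem.List.sorted_perm _ _ _
      have : (((PySem.Set.ofList cs).map f).map (fun p => p.1)).Nodup := by
        rw [List.map_map]
        have : ((fun p : Int × Int => p.1) ∘ f) = id := by funext v; rfl
        rw [this, List.map_id]
        exact PySem.Set.nodup_ofList cs
      exact ((hperm.map (fun p => p.1)).nodup_iff).mpr this
    have hne' : List.Pairwise (fun p q : Int × Int => p.1 ≠ q.1) (pvFirstPairs cs) :=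
      List.pairwise_map.mp hnodup
    exact (hle.and hne').imp (fun h => lt_of_le_of_ne h.1 h.2)
  · intro p hp
    obtain ⟨v, hv, hpv⟩ := List.mem_map.mp ((hmemP p).mp hp)
    have hvcs : v ∈ cs := (PySem.Set.mem_ofList cs v).mp hv
    obtain ⟨k, hk⟩ := Option.isSome_iff_exists.mp ((PySem.List.index?_isSome_iff cs v).mpr hvcs)
    refine ⟨k, ?_, ?_⟩
    · rw [← hpv]
      show (((PySem.List.index? cs v).getD 0 : Nat) : Int) = (k : Int)
      rw [hk]
      rfl
    · rw [← hpv]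
      exact hk
  · intro v hv
    refine ⟨f v, (hmemP (f v)).mpr (List.mem_map_of_mem ((PySem.Set.mem_ofList cs v).mpr hv)), rfl⟩
  · intro hne
    rw [hP, Ne, PySem.List.sorted_eq_nil_iff, List.map_eq_nil_iff]
    intro h
    obtain ⟨y, hy⟩ := List.exists_mem_of_ne_nil cs hne
    exact (List.eq_nil_iff_forall_not_mem.mp h y) ((PySem.Set.mem_ofList cs y).mpr hy)

theorem pvBisectSpec (pairs : List (Int × Int)) (t : Int)
    (hmono : ∀ i k : Nat, i ≤ k → k < pairs.length → (pairs.getD i (0,0)).1 ≤ (pairs.getD k (0,0)).1) :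
    ∀ d lo hi : Nat, hi - lo = d → lo ≤ hi → hi ≤ pairs.length →
    (∀ i : Nat, i < lo → (pairs.getD i (0,0)).1 < t) →
    (∀ i : Nat, hi ≤ i → i < pairs.length → ¬ (pairs.getD i (0,0)).1 < t) →
    (∀ i : Nat, i < pvBisect pairs t lo hi → (pairs.getD i (0,0)).1 < t) ∧
    (∀ i : Nat, pvBisect pairs t lo hi ≤ i → i < pairs.length → ¬ (pairs.getD i (0,0)).1 < t) ∧
    lo ≤ pvBisect pairs t lo hi ∧ pvBisect pairs t lo hi ≤ hi := by
  intro d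
  induction d using Nat.strong_induction_on with
  | _ d ih =>
    intro lo hi hd hlohi hhile hlo hhi
    unfold pvBisect
    by_cases h : lo < hi
    · rw [dif_pos h]
      by_cases hc : (pairs.getD ((lo + hi) / 2) (0, 0)).1 < t
      · rw [if_pos hc]
        have hrec := ih (hi - ((lo + hi) / 2 + 1)) (by omega) ((lo + hi) / 2 + 1) hi rfl
          (by omega) hhile
          (fun i hi' => lt_of_le_of_lt (hmono i ((lo + hi) / 2) (by omega) (by omega)) hc)
          hhi
        exact ⟨hrec.1, hrec.2.1, by omega, hrec.2.2.2⟩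
      · rw [if_neg hc]
        have hrec := ih ((lo + hi) / 2 - lo) (by omega) lo ((lo + hi) / 2) rfl
          (by omega) (by omega) hlo
          (fun i him hil => fun hcon => hc (lt_of_le_of_lt (hmono ((lo + hi) / 2) i him hil) hcon))
        exact ⟨hrec.1, hrec.2.1, hrec.2.2.1, by omega⟩
    · rw [dif_neg h]
      have : lo = hi := by omega
      subst this
      exact ⟨hlo, hhi, le_refl _, le_refl _⟩

-- the binary-searched neighbour choice is the (|value − t|, position)-lexicographic minimum
theorem pvAbsIf (x : Int) : |x| = if 0 ≤ x then x else -x := by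
  split_ifs with h
  · exact abs_of_nonneg h
  · exact abs_of_neg (by omega)

theorem pvClosestSpec (Q : List (Int × Int)) (t : Int)
    (hpw : List.Pairwise (fun p q => p.1 < q.1) Q) (hne : Q ≠ [])
    (hsnd : ∀ p ∈ Q, ∀ q ∈ Q, p.1 ≠ q.1 → p.2 ≠ q.2) :
    pvClosest Q t ∈ Q ∧
    (∀ p ∈ Q, |(pvClosest Q t).1 - t| ≤ |p.1 - t|) ∧
    (∀ p ∈ Q, |p.1 - t| = |(pvClosest Q t).1 - t| → p.1 ≠ (pvClosest Q t).1 → (pvClosest Q t).2 < p.2) := by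
  have hlen : 0 < Q.length := List.length_pos_iff.mpr hne
  have hstrict : ∀ i k : Nat, i < k → k < Q.length → (Q.getD i (0,0)).1 < (Q.getD k (0,0)).1 := by
    intro i k hik hk
    rw [List.getD_eq_getElem Q (0,0) (by omega), List.getD_eq_getElem Q (0,0) hk]
    exact List.pairwise_iff_getElem.mp hpw i k (by omega) hk hik
  have hmono : ∀ i k : Nat, i ≤ k → k < Q.length → (Q.getD i (0,0)).1 ≤ (Q.getD k (0,0)).1 := by
    intro i k hik hk
    rcases Nat.eq_or_lt_of_le hik with h | h
    · subst h; exact le_refl _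
    · exact le_of_lt (hstrict i k h hk)
  obtain ⟨hBlt, hBge, hB0, hBle⟩ := pvBisectSpec Q t hmono Q.length 0 Q.length (by omega) (by omega)
    (le_refl _) (fun i hi => absurd hi (Nat.not_lt_zero i))
    (fun i h1 h2 => absurd (lt_of_le_of_lt h1 h2) (lt_irrefl _))
  have hmemD : ∀ i : Nat, i < Q.length → Q.getD i (0,0) ∈ Q := by
    intro i hi
    rw [List.getD_eq_getElem Q (0,0) hi]
    exact List.getElem_mem hi
  have hidx : ∀ p ∈ Q, ∃ i : Nat, ∃ _h : i < Q.length, p = Q.getD i (0,0) := by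
    intro p hp
    obtain ⟨i, hi, hQi⟩ := List.getElem_of_mem hp
    exact ⟨i, hi, by rw [List.getD_eq_getElem Q (0,0) hi, hQi]⟩
  by_cases hj0 : pvBisect Q t 0 Q.length = 0
  · -- all values are ≥ t; the first pair is the unique minimiser
    have hceq : pvClosest Q t = Q.getD 0 (0,0) := by
      simp only [pvClosest]
      rw [if_pos hj0]
    have hge : ∀ i : Nat, i < Q.length → t ≤ (Q.getD i (0,0)).1 := by
      intro i hi
      exact not_lt.mp (hBge i (by omega) hi)
    rw [hceq]
    refine ⟨hmemD 0 hlen, ?_, ?_⟩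
    · intro p hp
      obtain ⟨i, hi, hpe⟩ := hidx p hp
      have h1 := hge 0 hlen
      have h2 := hge i hi
      have h3 := hmono 0 i (by omega) hi
      rw [hpe, pvAbsIf, pvAbsIf]
      split_ifs <;> omega
    · intro p hp heq hneq
      obtain ⟨i, hi, hpe⟩ := hidx p hp
      exfalso
      apply hneq
      have h1 := hge 0 hlen
      have h2 := hge i hi
      have h3 := hmono 0 i (by omega) hi
      rw [hpe, pvAbsIf, pvAbsIf] at heq
      rw [hpe]
      split_ifs at heq <;> omega
  · by_cases hjl : pvBisect Q t 0 Q.length = Q.length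
    · -- all values are < t; the last pair is the unique minimiser
      have hceq : pvClosest Q t = Q.getD (Q.length - 1) (0,0) := by
        simp only [pvClosest]
        rw [if_neg hj0, if_pos hjl, PySem.List.pyGetD_neg_one Q (0,0) hne,
            List.getLast_eq_getElem, List.getD_eq_getElem Q (0,0) (by omega)]
      have hlt : ∀ i : Nat, i < Q.length → (Q.getD i (0,0)).1 < t := by
        intro i hi
        exact hBlt i (by omega)
      rw [hceq]
      refine ⟨hmemD _ (by omega), ?_, ?_⟩
      · intro p hp
        obtain ⟨i, hi, hpe⟩ := hidx p hp
        have h1 := hlt (Q.length - 1) (by omega)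
        have h2 := hlt i hi
        have h3 := hmono i (Q.length - 1) (by omega) (by omega)
        rw [hpe, pvAbsIf, pvAbsIf]
        split_ifs <;> omega
      · intro p hp heq hneq
        obtain ⟨i, hi, hpe⟩ := hidx p hp
        exfalso
        apply hneq
        have h1 := hlt (Q.length - 1) (by omega)
        have h2 := hlt i hi
        have h3 := hmono i (Q.length - 1) (by omega) (by omega)
        rw [hpe, pvAbsIf, pvAbsIf] at heq
        rw [hpe]
        split_ifs at heq <;> omega
    · -- 0 < j < len: the two neighbours of t
      have hjpos : 0 < pvBisect Q t 0 Q.length := Nat.pos_of_ne_zero hj0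
      have hjlt : pvBisect Q t 0 Q.length < Q.length := lt_of_le_of_ne hBle hjl
      have hceq : pvClosest Q t =
          (if t - (Q.getD (pvBisect Q t 0 Q.length - 1) (0,0)).1
              < (Q.getD (pvBisect Q t 0 Q.length) (0,0)).1 - t
           then Q.getD (pvBisect Q t 0 Q.length - 1) (0,0)
           else if (Q.getD (pvBisect Q t 0 Q.length) (0,0)).1 - t
              < t - (Q.getD (pvBisect Q t 0 Q.length - 1) (0,0)).1
           then Q.getD (pvBisect Q t 0 Q.length) (0,0)
           else if (Q.getD (pvBisect Q t 0 Q.length - 1) (0,0)).2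
              < (Q.getD (pvBisect Q t 0 Q.length) (0,0)).2
           then Q.getD (pvBisect Q t 0 Q.length - 1) (0,0)
           else Q.getD (pvBisect Q t 0 Q.length) (0,0)) := by
        simp only [pvClosest]
        rw [if_neg hj0, if_neg hjl]
      have hp1t : (Q.getD (pvBisect Q t 0 Q.length - 1) (0,0)).1 < t :=
        hBlt (pvBisect Q t 0 Q.length - 1) (by omega)
      have hp2t : t ≤ (Q.getD (pvBisect Q t 0 Q.length) (0,0)).1 :=
        not_lt.mp (hBge (pvBisect Q t 0 Q.length) (le_refl _) hjlt)
      have hp1p2 : (Q.getD (pvBisect Q t 0 Q.length - 1) (0,0)).1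
          < (Q.getD (pvBisect Q t 0 Q.length) (0,0)).1 :=
        hstrict _ _ (by omega) hjlt
      have hsne : (Q.getD (pvBisect Q t 0 Q.length - 1) (0,0)).2
          ≠ (Q.getD (pvBisect Q t 0 Q.length) (0,0)).2 :=
        hsnd _ (hmemD _ (by omega)) _ (hmemD _ hjlt) (by omega)
      -- bounds for every index
      have hlows : ∀ i : Nat, i < pvBisect Q t 0 Q.length →
          (Q.getD i (0,0)).1 ≤ (Q.getD (pvBisect Q t 0 Q.length - 1) (0,0)).1
          ∧ (Q.getD i (0,0)).1 < t
          ∧ (i < pvBisect Q t 0 Q.length - 1 →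
              (Q.getD i (0,0)).1 < (Q.getD (pvBisect Q t 0 Q.length - 1) (0,0)).1) := by
        intro i hi
        exact ⟨hmono i _ (by omega) (by omega), hBlt i hi,
          fun h => hstrict i _ h (by omega)⟩
      have hhighs : ∀ i : Nat, pvBisect Q t 0 Q.length ≤ i → i < Q.length →
          (Q.getD (pvBisect Q t 0 Q.length) (0,0)).1 ≤ (Q.getD i (0,0)).1
          ∧ t ≤ (Q.getD i (0,0)).1
          ∧ (pvBisect Q t 0 Q.length < i →
              (Q.getD (pvBisect Q t 0 Q.length) (0,0)).1 < (Q.getD i (0,0)).1) := by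
        intro i hji hi
        exact ⟨hmono _ i hji hi, not_lt.mp (hBge i hji hi), fun h => hstrict _ i h hi⟩
      -- equal minimal distance pins the element down to one of the two neighbours
      have hpin : ∀ i : Nat, (hi : i < Q.length) →
          |(Q.getD i (0,0)).1 - t| = |(Q.getD (pvBisect Q t 0 Q.length - 1) (0,0)).1 - t| →
          i < pvBisect Q t 0 Q.length → i = pvBisect Q t 0 Q.length - 1 := by
        intro i hi heq hij
        by_contra hcon
        have h1 := hlows i hij
        rw [pvAbsIf, pvAbsIf] at heq
        have h2 := h1.2.2 (by omega)
        split_ifs at heq <;> omega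
      have hpin2 : ∀ i : Nat, (hi : i < Q.length) →
          |(Q.getD i (0,0)).1 - t| = |(Q.getD (pvBisect Q t 0 Q.length) (0,0)).1 - t| →
          pvBisect Q t 0 Q.length ≤ i → i = pvBisect Q t 0 Q.length := by
        intro i hi heq hij
        by_contra hcon
        have h1 := hhighs i hij hi
        rw [pvAbsIf, pvAbsIf] at heq
        have h2 := h1.2.2 (by omega)
        split_ifs at heq <;> omega
      rw [hceq]
      split_ifs with hd1 hd2 hps
      · -- d1 < d2 : left neighbour, strictly better than everything else
        refine ⟨hmemD _ (by omega), ?_, ?_⟩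
        · intro p hp
          obtain ⟨i, hi, hpe⟩ := hidx p hp
          rw [hpe, pvAbsIf, pvAbsIf]
          by_cases hij : i < pvBisect Q t 0 Q.length
          · have h1 := hlows i hij
            split_ifs <;> omega
          · have h1 := hhighs i (by omega) hi
            split_ifs <;> omega
        · intro p hp heq hneq
          obtain ⟨i, hi, hpe⟩ := hidx p hp
          exfalso
          by_cases hij : i < pvBisect Q t 0 Q.length
          · have := hpin i hi (by rw [← hpe]; exact heq) hij
            apply hneq
            rw [hpe, this]
          · have h1 := hhighs i (by omega) hi
            rw [hpe, pvAbsIf, pvAbsIf] at heq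
            split_ifs at heq <;> omega
      · -- d2 < d1 : right neighbour, strictly better than everything else
        refine ⟨hmemD _ hjlt, ?_, ?_⟩
        · intro p hp
          obtain ⟨i, hi, hpe⟩ := hidx p hp
          rw [hpe, pvAbsIf, pvAbsIf]
          by_cases hij : i < pvBisect Q t 0 Q.length
          · have h1 := hlows i hij
            split_ifs <;> omega
          · have h1 := hhighs i (by omega) hi
            split_ifs <;> omega
        · intro p hp heq hneq
          obtain ⟨i, hi, hpe⟩ := hidx p hp
          exfalso
          by_cases hij : i < pvBisect Q t 0 Q.length
          · have h1 := hlows i hij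
            rw [hpe, pvAbsIf, pvAbsIf] at heq
            split_ifs at heq <;> omega
          · have := hpin2 i hi (by rw [← hpe]; exact heq) (by omega)
            apply hneq
            rw [hpe, this]
      · -- tie, left neighbour has the smaller first-occurrence position
        refine ⟨hmemD _ (by omega), ?_, ?_⟩
        · intro p hp
          obtain ⟨i, hi, hpe⟩ := hidx p hp
          rw [hpe, pvAbsIf, pvAbsIf]
          by_cases hij : i < pvBisect Q t 0 Q.length
          · have h1 := hlows i hij
            split_ifs <;> omega
          · have h1 := hhighs i (by omega) hi
            split_ifs <;> omega
        · intro p hp heq hneq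
          obtain ⟨i, hi, hpe⟩ := hidx p hp
          by_cases hij : i < pvBisect Q t 0 Q.length
          · exfalso
            have := hpin i hi (by rw [← hpe]; exact heq) hij
            apply hneq
            rw [hpe, this]
          · have hd12 : |(Q.getD (pvBisect Q t 0 Q.length) (0,0)).1 - t|
                = |(Q.getD (pvBisect Q t 0 Q.length - 1) (0,0)).1 - t| := by
              rw [pvAbsIf, pvAbsIf]
              split_ifs <;> omega
            have := hpin2 i hi (by rw [← hpe, heq, hd12]) (by omega)
            rw [hpe, this]
            exact hps
      · -- tie, right neighbour has the smaller first-occurrence position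
        refine ⟨hmemD _ hjlt, ?_, ?_⟩
        · intro p hp
          obtain ⟨i, hi, hpe⟩ := hidx p hp
          rw [hpe, pvAbsIf, pvAbsIf]
          by_cases hij : i < pvBisect Q t 0 Q.length
          · have h1 := hlows i hij
            split_ifs <;> omega
          · have h1 := hhighs i (by omega) hi
            split_ifs <;> omega
        · intro p hp heq hneq
          obtain ⟨i, hi, hpe⟩ := hidx p hp
          by_cases hij : i < pvBisect Q t 0 Q.length
          · have hd12 : |(Q.getD (pvBisect Q t 0 Q.length - 1) (0,0)).1 - t|
                = |(Q.getD (pvBisect Q t 0 Q.length) (0,0)).1 - t| := by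
              rw [pvAbsIf, pvAbsIf]
              split_ifs <;> omega
            have := hpin i hi (by rw [← hpe, heq, hd12]) hij
            rw [hpe, this]
            omega
          · exfalso
            have := hpin2 i hi (by rw [← hpe]; exact heq) (by omega)
            apply hneq
            rw [hpe, this]

-- the bisected choice over the pair list IS Python min()'s first argmin over the raw list
theorem pvCore (cs : List Int) (hne : cs ≠ []) (t : Int) :
    PySem.List.min? (List.range cs.length) (fun i => |cs.getD i 0 - t|)
      = some (pvClosest (pvFirstPairs cs) t).2.toNat ∧
    (pvClosest (pvFirstPairs cs) t).2 = (((pvClosest (pvFirstPairs cs) t).2.toNat : Nat) : Int) ∧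
    cs.getD (pvClosest (pvFirstPairs cs) t).2.toNat 0 = (pvClosest (pvFirstPairs cs) t).1 := by
  obtain ⟨hpw, hb, hc, hne'⟩ := pvQSpec cs
  have hQne := hne' hne
  have hsnd : ∀ p ∈ pvFirstPairs cs, ∀ q ∈ pvFirstPairs cs, p.1 ≠ q.1 → p.2 ≠ q.2 := by
    intro p hp q hq hne12 hcon
    obtain ⟨kp, hkp2, hkp⟩ := hb p hp
    obtain ⟨kq, hkq2, hkq⟩ := hb q hq
    have hkk : kp = kq := by
      rw [hkp2, hkq2] at hcon
      exact_mod_cast hcon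
    subst hkk
    obtain ⟨hl1, hv1, _⟩ := PySem.List.getElem_of_index?_eq_some hkp
    obtain ⟨hl2, hv2, _⟩ := PySem.List.getElem_of_index?_eq_some hkq
    exact hne12 (by rw [← hv1, hv2])
  obtain ⟨hmem, hmin, htie⟩ := pvClosestSpec (pvFirstPairs cs) t hpw hQne hsnd
  obtain ⟨k, hk2, hk⟩ := hb _ hmem
  obtain ⟨hklen, hkv, hkfirst⟩ := PySem.List.getElem_of_index?_eq_some hk
  have htoNat : (pvClosest (pvFirstPairs cs) t).2.toNat = k := by rw [hk2]; simp
  have hgetc : cs.getD k 0 = (pvClosest (pvFirstPairs cs) t).1 := by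
    rw [List.getD_eq_getElem cs 0 hklen, hkv]
  -- k satisfies the first-argmin characterisation
  have hspec : k < cs.length ∧ (∀ i, i < cs.length → |cs.getD k 0 - t| ≤ |cs.getD i 0 - t|)
      ∧ (∀ i, i < k → |cs.getD k 0 - t| < |cs.getD i 0 - t|) := by
    refine ⟨hklen, ?_, ?_⟩
    · intro i hi
      have hics : cs.getD i 0 ∈ cs := by
        rw [List.getD_eq_getElem cs 0 hi]
        exact List.getElem_mem hi
      obtain ⟨p, hp, hpv⟩ := hc _ hics
      have hle := hmin p hp
      rw [hpv] at hle
      rw [hgetc]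
      exact hle
    · intro i hik
      have hi : i < cs.length := by omega
      have hics : cs.getD i 0 ∈ cs := by
        rw [List.getD_eq_getElem cs 0 hi]
        exact List.getElem_mem hi
      obtain ⟨p, hp, hpv⟩ := hc _ hics
      rw [hgetc]
      by_contra hcon
      have hle := hmin p hp
      rw [hpv] at hle
      have heq : |p.1 - t| = |(pvClosest (pvFirstPairs cs) t).1 - t| := by
        rw [hpv]
        omega
      by_cases hv : p.1 = (pvClosest (pvFirstPairs cs) t).1
      · -- cs[i] equals the chosen value before its first occurrence: impossible
        apply hkfirst i hik
        rw [← List.getD_eq_getElem cs 0 hi, ← hpv, hv]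
      · have hlt := htie p hp heq hv
        obtain ⟨kp, hkp2, hkp⟩ := hb p hp
        obtain ⟨hkpl, hkpv, hkpfirst⟩ := PySem.List.getElem_of_index?_eq_some hkp
        have hkpi : kp ≤ i := by
          by_contra hgt
          exact hkpfirst i (by omega) (by rw [← List.getD_eq_getElem cs 0 hi]; exact hpv.symm)
        rw [hk2, hkp2] at hlt
        have : k < kp := by exact_mod_cast hlt
        omega
  obtain ⟨ks, hks, hksl, hksmin, hksfst⟩ :=
    pvMinRangeSpec (fun i => |cs.getD i 0 - t|) cs.length (List.length_pos_iff.mpr hne)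
  have hkk : ks = k := pvSpecUnique (fun i => |cs.getD i 0 - t|) cs.length ks k
    ⟨hksl, hksmin, hksfst⟩ hspec
  subst hkk
  rw [htoNat]
  exact ⟨hks, hk2, hgetc⟩

theorem pvMin?_map {α β : Type} (l : List α) (f : α → β) (key : β → Int) :
    PySem.List.min? (l.map f) key = (PySem.List.min? l (fun x => key (f x))).map f := by
  simp only [PySem.List.min?, List.foldl_map]
  suffices h : ∀ (acc : Option α),
      l.foldl (fun b x => match b with
        | none => some (f x)
        | some m => if key (f x) < key m then some (f x) else some m) (acc.map f) =
      (l.foldl (fun a x => match a with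
        | none => some x
        | some m => if key (f x) < key (f m) then some x else some m) acc).map f by
    simpa using h none
  induction l with
  | nil => intro acc; rfl
  | cons x l ih =>
    intro acc
    have h : (match acc.map f with
        | none => some (f x)
        | some m => if key (f x) < key m then some (f x) else some m) =
        (match acc with
         | none => some x
         | some m => if key (f x) < key (f m) then some x else some m).map f := by
      cases acc with
      | none => rfl
      | some m => simp only [Option.map_some]; split_ifs <;> rfl
    simpa [List.foldl_cons, h] using ih _

theorem pvMin?_congr {α : Type} (l : List α) (k1 k2 : α → Int)
    (h : ∀ x ∈ l, k1 x = k2 x) : PySem.List.min? l k1 = PySem.List.min? l k2 := by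
  simp only [PySem.List.min?]
  suffices hs : ∀ (l' : List α) (acc : Option α), (∀ x ∈ l', k1 x = k2 x) →
      (∀ m, acc = some m → k1 m = k2 m) →
      l'.foldl (fun a x => match a with
        | none => some x
        | some m => if k1 x < k1 m then some x else some m) acc =
      l'.foldl (fun a x => match a with
        | none => some x
        | some m => if k2 x < k2 m then some x else some m) acc by
    exact hs l none h (by simp)
  clear h
  intro l'
  induction l' with
  | nil => intro acc _ _; rfl
  | cons x l ih =>
    intro acc h hacc
    have hx : k1 x = k2 x := h x (List.mem_cons_self)
    have htail : ∀ y ∈ l, k1 y = k2 y := fun y hy => h y (List.mem_cons_of_mem _ hy)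
    cases acc with
    | none =>
      simp only [List.foldl_cons]
      exact ih (some x) htail (by intro m hm; simp at hm; subst hm; exact hx)
    | some m0 =>
      have hm0 : k1 m0 = k2 m0 := hacc m0 rfl
      simp only [List.foldl_cons]
      rw [show (if k1 x < k1 m0 then some x else some m0) = (if k2 x < k2 m0 then some x else some m0) by rw [hx, hm0]]
      split_ifs with hc
      · exact ih (some x) htail (by intro m hm; simp at hm; subst hm; exact hx)
      · exact ih (some m0) htail (by intro m hm; simp at hm; subst hm; exact hm0)

theorem pvMapGetDRange (l : List Int) :
    (List.range l.length).map (fun i => l.getD i 0) = l := by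
  apply List.ext_getElem
  · simp
  · intro i h1 h2
    simp [List.getD_eq_getElem?_getD, h2]

-- per-target chosen value agrees (fallback: values of the empty points themselves)
theorem pvValue_eq (eps : List Int) (heps : eps ≠ []) (t : Int) :
    (PySem.List.min? eps (fun x => |x - t|)).getD 0 = (pvClosest (pvFirstPairs eps) t).1 := by
  obtain ⟨hminr, hcast, hval⟩ := pvCore eps heps t
  have h1 : PySem.List.min? eps (fun x => |x - t|)
      = PySem.List.min? ((List.range eps.length).map (fun i => eps.getD i 0)) (fun x => |x - t|) := by
    rw [pvMapGetDRange]
  rw [h1, pvMin?_map, hminr]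
  simp only [Option.map_some, Option.getD_some]
  exact hval

-- fallback branches agree
theorem pvFallback_eq (eps : List Int) (n : Int) (heps : eps ≠ []) (hn : 1 < n) :
    pvSplitTime eps n = pvFallbackTime eps n := by
  unfold pvSplitTime pvFallbackTime
  rw [if_neg (show ¬ (n ≤ 1 ∨ eps = []) by
    rintro (h1 | h2)
    · omega
    · exact heps h2)]
  by_cases hlh : PySem.List.pyGetD eps 0 0 = PySem.List.pyGetD eps (-1) 0
  · rw [if_pos hlh, if_pos hlh]
  · rw [if_neg hlh, if_neg hlh]
    simp only [List.foldl_map]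
    congr 1
    congr 1
    funext s i
    rw [pvValue_eq eps heps]

-- per-target chosen point agrees (main branch: first argmin over the cumulative counts)
theorem pvChoice_eq (eps msgs : List Int) (t : Int) (heps : eps ≠ []) :
    PySem.List.pyGetD eps
      ((PySem.List.min? (PySem.List.pyRange 0 (eps.length : Int) 1)
        (fun i => |PySem.List.pyGetD ((List.range (eps.length + 1)).map (fun k => (msgs.take k).sum)) (i + 1) 0 - t|)).getD 0) 0
    = PySem.List.pyGetD eps
        (pvClosest (pvFirstPairs ((List.range eps.length).map (fun k => (msgs.take (k + 1)).sum))) t).2 0 := by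
  set cs := (List.range eps.length).map (fun k => (msgs.take (k + 1)).sum) with hcs
  have hcsl : cs.length = eps.length := by simp [hcs]
  have hepsl : 0 < eps.length := List.length_pos_iff.mpr heps
  have hcsne : cs ≠ [] := by
    intro h
    rw [h] at hcsl
    simp at hcsl
    omega
  obtain ⟨hminr, hcast, hval⟩ := pvCore cs hcsne t
  rw [PySem.List.pyRange_zero_natCast, pvMin?_map,
      pvMin?_congr (List.range eps.length) _ (fun i : Nat => |cs.getD i 0 - t|) (by
        intro k hk
        have hkm : k < eps.length := List.mem_range.mp hk
        show |PySem.List.pyGetD ((List.range (eps.length + 1)).map (fun k => (msgs.take k).sum)) ((k : Int) + 1) 0 - t| = _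
        rw [show ((k : Int) + 1) = ((k + 1 : Nat) : Int) by push_cast; ring,
            PySem.List.pyGetD_natCast,
            PySem.List.getD_map_range _ (eps.length + 1) (k + 1) 0 (by omega)]
        show _ = |cs.getD k 0 - t|
        rw [hcs, PySem.List.getD_map_range _ eps.length k 0 hkm])]
  rw [hcsl] at hminr
  rw [hminr]
  simp only [Option.map_some, Option.getD_some]
  rw [← hcast]

-- ===== VERDICT (by name: the statement is the Claim_ definition above) =====
theorem select_split_points_by_message_count_py_spec : Claim_equal_select_split_points_by_message_count_py := by
  intro eps msgs n _
  unfold Spec_select_split_points_by_message_count_py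
  unfold select_split_points_by_message_count_py select_split_points_by_message_count_py_alt
  by_cases hg : n ≤ 1 ∨ eps = []
  · rw [if_pos hg, if_pos hg]
  · rw [if_neg hg, if_neg hg]
    have hn : 1 < n := by
      rcases lt_or_ge 1 n with h | h
      · exact h
      · exact absurd (Or.inl (by omega)) hg
    have heps : eps ≠ [] := fun h => hg (Or.inr h)
    simp only [PySem.List.len_eq]
    by_cases hlen : (msgs.length : Int) ≠ (eps.length : Int) + 1
    · rw [if_pos hlen, if_pos hlen]
      exact pvFallback_eq eps n heps hn
    · rw [if_neg hlen, if_neg hlen]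
      have hlenN : msgs.length = eps.length + 1 := by
        rw [not_not] at hlen
        exact_mod_cast hlen
      have hml : eps.length ≤ msgs.length := by omega
      have hne : msgs ≠ [] := by
        intro h
        rw [h] at hlenN
        simp at hlenN
      rw [pvCum msgs eps.length hml, pvCumB msgs eps.length hml]
      -- the two totals agree
      have hlastA : PySem.List.pyGetD ((List.range (eps.length + 1)).map (fun k => (msgs.take k).sum)) (-1) 0
          = (msgs.take eps.length).sum := by
        rw [show List.range (eps.length + 1) = List.range eps.length ++ [eps.length] from List.range_succ,
            List.map_append]
        exact PySem.List.pyGetD_neg_one_append_singleton _ _ _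
      have hlastM : PySem.List.pyGetD msgs (-1) 0 = PySem.List.pyGetD msgs ((eps.length : Nat) : Int) 0 := by
        rw [PySem.List.pyGetD_neg_one msgs 0 hne, PySem.List.pyGetD_natCast,
            List.getLast_eq_getElem, List.getD_eq_getElem msgs 0 (by omega)]
        congr 1
        omega
      rw [hlastA, hlastM]
      simp only [List.foldl_map]
      congr 1
      congr 1
      funext s k
      congr 1
      rw [pvChoice_eq eps msgs _ heps]
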